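-- pv_equiv track=rewrite | github.com/wchung42/aoc2021 | day-10/solution.py | part2
-- ===== SOURCE A (Python) =====
-- def part2(lines):
--     """Solve part 2"""
--     scores = []
--
--     for line in lines:
--         corrupt = False
--         openings = []
--
--         for symbol in line:
--             if symbol in '([{<':
--                 openings.append('([{<'.index(symbol))
--             else:
--                 temp = openings.pop()
--                 if ')]}>'.index(symbol) != temp:
--                     corrupt = True
--                     break
--
--         if corrupt:
--             continue
--
--         missing_symbols = ''
--         for opener in openings:
--             missing_symbols += ')]}>'[opener]
--         missing_symbols = missing_symbols[::-1]
--
--         score = 0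
--         for i in range(len(missing_symbols)):
--             symbol = missing_symbols[i]
--             score *= 5
--             if symbol == ')':
--                 score += 1
--             elif symbol == ']':
--                 score += 2
--             elif symbol == '}':
--                 score += 3
--             else:
--                 score += 4
--         scores.append(score)
--
--     scores.sort()
--
--     return scores[(len(scores) - 1) // 2]
-- ===== SOURCE B (Python) =====
-- # Different algorithm: no stack at all. Each line is reduced by repeatedly
-- # deleting adjacent matched pairs ('()', '[]', '{}', '<>') until a fixpoint;
-- # a line is corrupt iff a closing bracket survives in the residue, and the
-- # completion score is read off the residue right-to-left.
--
-- def part2(lines):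
--     """Solve part 2"""
--     scores = []
--     for line in lines:
--         s = line
--         while True:
--             t = s.replace('()', '').replace('[]', '').replace('{}', '').replace('<>', '')
--             if t == s:
--                 break
--             s = t
--         if any(c in ')]}>' for c in s):
--             continue
--         score = 0
--         for c in reversed(s):
--             score = score * 5 + '([{<'.index(c) + 1
--         scores.append(score)
--     scores.sort()
--     return scores[(len(scores) - 1) // 2]
-- ===== Notes on version B (the rewrite author's own statement) =====
-- stated objective: alternative
-- what changed: B drops the stack matcher entirely: each line is reduced by repeatedly deleting adjacent matched bracket pairs with str.replace until a fixpoint, a line is scored iff the residue is opening brackets only, and the completion score is read off the residue right-to-left.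
import Mathlib
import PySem

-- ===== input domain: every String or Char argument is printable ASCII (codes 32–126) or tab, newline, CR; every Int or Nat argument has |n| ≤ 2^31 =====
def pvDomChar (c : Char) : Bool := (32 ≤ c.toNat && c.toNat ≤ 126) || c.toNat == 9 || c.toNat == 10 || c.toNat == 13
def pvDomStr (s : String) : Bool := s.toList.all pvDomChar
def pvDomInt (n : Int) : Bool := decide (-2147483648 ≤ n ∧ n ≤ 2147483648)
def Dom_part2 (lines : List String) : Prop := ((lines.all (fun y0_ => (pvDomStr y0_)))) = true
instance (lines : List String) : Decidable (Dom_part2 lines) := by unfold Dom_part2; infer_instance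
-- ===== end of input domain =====

-- B replaces A's stack matcher by a different algorithm: repeated cancellation of
-- adjacent matched bracket pairs until a fixpoint; a line is scored iff the residue
-- is opening brackets only, read right-to-left. Same cost class, no speed claim.

-- ===== PORT A =====
def part2_openers : List Char := ['(', '[', '{', '<']
def part2_closers : List Char := [')', ']', '}', '>']

-- the inner `for symbol in line` loop: returns (corrupt, openings), none = exception
def part2_matchA : List Char → List Int → Option (Bool × List Int)
  | [], openings => some (false, openings)
  | c :: cs, openings =>
    if PySem.Chars.isIn [c] part2_openers then
      part2_matchA cs (openings ++ [PySem.Chars.find part2_openers [c]])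
    else
      match PySem.List.pop? openings with
      | none => none                                    -- openings.pop() raises IndexError
      | some (temp, rest) =>
        let f := PySem.Chars.find part2_closers [c]     -- ')]}>'.index(symbol)
        if f = -1 then none                             -- .index raises ValueError
        else if f ≠ temp then some (true, rest)         -- corrupt = True; break
        else part2_matchA cs rest

-- missing_symbols = '' ; for opener in openings: missing_symbols += ')]}>'[opener]
def part2_missing (openings : List Int) : Option (List Char) :=
  openings.foldlM (fun acc o => (PySem.List.pyGet? part2_closers o).map (fun ch => acc ++ [ch])) []

-- score = 0 ; for i in range(len(missing_symbols)): …
def part2_scoreLoop (ms : List Char) : Int :=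
  ms.foldl (fun sc c =>
    sc * 5 + (if c = ')' then 1 else if c = ']' then 2 else if c = '}' then 3 else 4)) 0

def part2_scoresA : List String → List Int → Option (List Int)
  | [], scores => some scores
  | l :: ls, scores =>
    match part2_matchA l.toList [] with
    | none => none
    | some (corrupt, openings) =>
      if corrupt then part2_scoresA ls scores
      else
        match part2_missing openings with
        | none => none
        | some ms0 =>
          part2_scoresA ls (scores ++
            [part2_scoreLoop ((PySem.List.slice? ms0 none none (-1)).getD [])])  -- [::-1]

def part2 (lines : List String) : Int :=
  match part2_scoresA lines [] with
  | none => 0                                           -- Python raises here; excluded by Pre_part2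
  | some scores =>
    (PySem.List.pyGet? (PySem.List.sorted scores id)
      (PySem.Int.floordiv ((scores.length : Int) - 1) 2)).getD 0

-- ===== PORT B =====
-- one pass of  s.replace('()','').replace('[]','').replace('{}','').replace('<>','')
def part2_stepB (s : List Char) : List Char :=
  PySem.Chars.replace (PySem.Chars.replace (PySem.Chars.replace
    (PySem.Chars.replace s ['(', ')'] []) ['[', ']'] []) ['{', '}'] []) ['<', '>'] []

-- the `while True: … if t == s: break` loop; fuel `length+1` provably reaches the
-- fixpoint (each changed pass strictly shortens the string, lemma part2_reduceB_fix)
def part2_reduceB : Nat → List Char → List Char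
  | 0, s => s
  | fuel + 1, s =>
    let t := part2_stepB s
    if t = s then s else part2_reduceB fuel t

-- body of B's per-line loop: residue, closer test, right-to-left score;
-- some none = corrupt (skipped), outer none = '([{<'.index raises ValueError
def part2_lineB (l : List Char) : Option (Option Int) :=
  let s := part2_reduceB (l.length + 1) l
  if s.any (fun ch => PySem.Chars.isIn [ch] part2_closers) then
    some none
  else
    match s.reverse.foldlM (fun score ch =>
      let f := PySem.Chars.find part2_openers [ch]
      if f = -1 then none else some (score * 5 + f + 1)) (0 : Int) with
    | none => none
    | some sc => some (some sc)

def part2_alt (lines : List String) : Int :=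
  match lines.foldlM (fun scores line =>
      (part2_lineB line.toList).map (fun r =>
        match r with
        | some s => scores ++ [s]
        | none => scores)) ([] : List Int) with
  | none => 0                                           -- Python raises here; excluded by Pre_part2
  | some scores =>
    (PySem.List.pyGet? (PySem.List.sorted scores id)
      (PySem.Int.floordiv ((scores.length : Int) - 1) 2)).getD 0

-- ===== PRECONDITION & SPEC =====
-- Bracket-grammar status of a line, read left to right with a stack of expected
-- values: some (some st) = line scored (st = pending openers, top first),
-- some none = corrupt (skipped), none = Python raises (non-bracket symbol, or a
-- closer on an empty stack). Stack underflow has no stackless closed form; this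
-- status predicate is the canonical description of which inputs A processes.
def part2_openVal (c : Char) : Option Nat :=
  if c = '(' then some 0 else if c = '[' then some 1 else
  if c = '{' then some 2 else if c = '<' then some 3 else none

def part2_closeVal (c : Char) : Option Nat :=
  if c = ')' then some 0 else if c = ']' then some 1 else
  if c = '}' then some 2 else if c = '>' then some 3 else none

def part2_runL : List Char → List Nat → Option (Option (List Nat))
  | [], st => some (some st)
  | c :: cs, st =>
    match part2_openVal c with
    | some v => part2_runL cs (v :: st)
    | none =>
      match part2_closeVal c, st with
      | some w, t :: r => if w = t then part2_runL cs r else some none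
      | _, _ => none

-- Pre_ excludes exactly the inputs on which Python A raises: a line with a
-- non-bracket symbol or a closer popping an empty stack (IndexError/ValueError),
-- reached before any mismatch, and the no-scorable-line case (scores[...] IndexError).
def Pre_part2 (lines : List String) : Prop :=
  (lines.all fun l => (part2_runL l.toList []).isSome) = true ∧
  (lines.any fun l => ((part2_runL l.toList []).map Option.isSome) = some true) = true

instance (lines : List String) : Decidable (Pre_part2 lines) := by
  unfold Pre_part2; infer_instance

def pvWitness_part2 : List String := ["<([{", "(]", "()"]

def Spec_part2 (lines : List String) (out : Int) : Prop := out = part2_alt lines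
instance (lines : List String) (out : Int) : Decidable (Spec_part2 lines out) := by
  unfold Spec_part2; infer_instance

-- ===== CLAIM (what is proved, stated in full; the proofs are below) =====
def Claim_equal_part2 : Prop :=
  ∀ (lines : List String), Dom_part2 lines → Pre_part2 lines → Spec_part2 lines (part2 lines)

-- ===== LEMMAS AND PROOFS =====

-- one cancellation pass for a single pair, as a plain structural recursion
def part2_repl (o c : Char) : List Char → List Char
  | [] => []
  | [x] => [x]
  | x :: y :: t => if x = o ∧ y = c then part2_repl o c t else x :: part2_repl o c (y :: t)

theorem part2_go_eq (o c : Char) : ∀ (f : Nat) (l acc : List Char), l.length ≤ f →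
    PySem.Chars.replace.go [o, c] [] f l acc = acc.reverse ++ part2_repl o c l := by
  intro f
  induction f with
  | zero =>
    intro l acc h
    have hl : l = [] := List.length_eq_zero_iff.mp (Nat.le_zero.mp h)
    subst hl
    simp [PySem.Chars.replace.go, part2_repl]
  | succ f ih =>
    intro l acc h
    match l with
    | [] => simp [PySem.Chars.replace.go, part2_repl]
    | [x] =>
      rw [PySem.Chars.replace.go]
      have hpre : [o, c].isPrefixOf [x] = false := by
        apply Bool.eq_false_iff.mpr; intro h'
        have := (List.isPrefixOf_iff_prefix.mp h').length_le
        simp at this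
      simp only [hpre, if_neg Bool.false_ne_true]
      rw [ih [] (x :: acc) (by simp)]
      simp [part2_repl]
    | x :: y :: t =>
      rw [PySem.Chars.replace.go]
      simp only [List.length_cons] at h
      by_cases hp : x = o ∧ y = c
      · obtain ⟨rfl, rfl⟩ := hp
        have hpre : [x, y].isPrefixOf (x :: y :: t) = true := by
          simp
        simp only [hpre, if_true, List.length_cons, List.length_nil, List.drop_succ_cons,
          List.reverse_nil, List.nil_append, List.drop]
        rw [ih t acc (by omega)]
        simp [part2_repl]
      · have hpre : [o, c].isPrefixOf (x :: y :: t) = false := by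
          apply Bool.eq_false_iff.mpr; intro h'
          have h2 := List.isPrefixOf_iff_prefix.mp h'
          rw [List.cons_prefix_cons] at h2
          obtain ⟨rfl, h2⟩ := h2
          rw [List.cons_prefix_cons] at h2
          exact hp ⟨rfl, h2.1.symm⟩
        simp only [hpre, if_neg Bool.false_ne_true]
        rw [ih (y :: t) (x :: acc) (by simp; omega)]
        simp [part2_repl, hp]

theorem part2_replace_eq_repl (o c : Char) (s : List Char) :
    PySem.Chars.replace s [o, c] [] = part2_repl o c s := by
  rw [PySem.Chars.replace]
  simp [part2_go_eq o c s.length s [] le_rfl]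

theorem part2_repl_length (o c : Char) (s : List Char) :
    (part2_repl o c s).length ≤ s.length := by
  fun_induction part2_repl o c s with
  | case1 => simp
  | case2 => simp
  | case3 x y t hp ih => simp; omega
  | case4 x y t hp ih => simpa using ih

theorem part2_repl_len_eq (o c : Char) (s : List Char)
    (h : (part2_repl o c s).length = s.length) : part2_repl o c s = s := by
  fun_induction part2_repl o c s with
  | case1 => rfl
  | case2 => rfl
  | case3 x y t hp ih => exfalso; have := part2_repl_length o c t; simp at h; omega
  | case4 x y t hp ih => simp at h ⊢; exact ih h

theorem part2_repl_fix_no_occ (o c : Char) (s : List Char) (h : part2_repl o c s = s) :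
    ∀ u w, s ≠ u ++ o :: c :: w := by
  fun_induction part2_repl o c s with
  | case1 => intro u w hu; cases u <;> simp at hu
  | case2 x => intro u w hu; cases u with
      | nil => simp at hu
      | cons a u' => simp at hu
  | case3 x y t hp ih =>
    exfalso
    have h1 := part2_repl_length o c t
    have h2 : (part2_repl o c t).length = t.length + 2 := by rw [h]; simp
    omega
  | case4 x y t hp ih =>
    intro u w hu
    have htail : part2_repl o c (y :: t) = y :: t := by injection h
    cases u with
    | nil => simp at hu; exact hp ⟨hu.1, hu.2.1⟩
    | cons a u' =>
      simp at hu
      exact ih htail u' w hu.2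

theorem part2_runL_cons_open (c : Char) (cs : List Char) (v : Nat) (st : List Nat)
    (h : part2_openVal c = some v) :
    part2_runL (c :: cs) st = part2_runL cs (v :: st) := by
  simp [part2_runL, h]

theorem part2_runL_cons_close (c : Char) (cs : List Char) (w : Nat)
    (hno : part2_openVal c = none) (h : part2_closeVal c = some w) :
    (∀ t r, part2_runL (c :: cs) (t :: r) = if w = t then part2_runL cs r else some none)
    ∧ part2_runL (c :: cs) [] = none := by
  refine ⟨fun t r => ?_, ?_⟩ <;> simp [part2_runL, hno, h]

theorem part2_runL_cons_bad (c : Char) (cs : List Char) (st : List Nat)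
    (hno : part2_openVal c = none) (h : part2_closeVal c = none) :
    part2_runL (c :: cs) st = none := by
  cases st <;> simp [part2_runL, hno, h]

theorem part2_open_close_distinct (x : Char) :
    (∀ v, part2_openVal x = some v → part2_closeVal x = none)
    ∧ (∀ v, part2_closeVal x = some v → part2_openVal x = none) := by
  unfold part2_openVal part2_closeVal
  constructor <;> intro v h <;> split_ifs at h ⊢ <;> simp_all

theorem part2_repl_runL (o c : Char) (v : Nat) (ho : part2_openVal o = some v)
    (hc : part2_closeVal c = some v) (s : List Char) :
    ∀ st, part2_runL (part2_repl o c s) st = part2_runL s st := by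
  fun_induction part2_repl o c s with
  | case1 => intro st; rfl
  | case2 x => intro st; rfl
  | case3 x y t hp ih =>
    intro st
    obtain ⟨rfl, rfl⟩ := hp
    rw [ih st]
    rw [part2_runL_cons_open x (y :: t) v st ho,
      (part2_runL_cons_close y t v ((part2_open_close_distinct y).2 v hc) hc).1 v st]
    simp
  | case4 x y t hp ih =>
    intro st
    match hx : part2_openVal x with
    | some u =>
      rw [part2_runL_cons_open x _ u st hx, part2_runL_cons_open x _ u st hx]
      exact ih (u :: st)
    | none =>
      match hcx : part2_closeVal x with
      | some w =>
        match st with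
        | [] => rw [((part2_runL_cons_close x _ w hx hcx).2),
                    ((part2_runL_cons_close x _ w hx hcx).2)]
        | t' :: r =>
          rw [(part2_runL_cons_close x _ w hx hcx).1 t' r,
              (part2_runL_cons_close x _ w hx hcx).1 t' r]
          by_cases hw : w = t'
          · simp only [if_pos hw]; exact ih r
          · simp [if_neg hw]
      | none => rw [part2_runL_cons_bad x _ st hx hcx, part2_runL_cons_bad x _ st hx hcx]

def part2_ovD (ch : Char) : Nat := (part2_openVal ch).getD 0

theorem part2_runL_append_open (p : List Char)
    (hp : ∀ ch ∈ p, (part2_openVal ch).isSome) :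
    ∀ (rest : List Char) (st : List Nat),
    part2_runL (p ++ rest) st = part2_runL rest ((p.map part2_ovD).reverse ++ st) := by
  induction p with
  | nil => intro rest st; rfl
  | cons a p ih =>
    intro rest st
    obtain ⟨v, hv⟩ := Option.isSome_iff_exists.mp (hp a (by simp))
    have hd : part2_ovD a = v := by simp [part2_ovD, hv]
    rw [List.cons_append, part2_runL_cons_open a (p ++ rest) v st hv,
      ih (fun ch h => hp ch (by simp [h])) rest (v :: st)]
    simp [hd]

theorem part2_runL_all_open (p : List Char)
    (hp : ∀ ch ∈ p, (part2_openVal ch).isSome) (st : List Nat) :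
    part2_runL p st = some (some ((p.map part2_ovD).reverse ++ st)) := by
  have := part2_runL_append_open p hp [] st
  simpa using this

theorem part2_pair_class (o c : Char) (v : Nat) (ho : part2_openVal o = some v)
    (hc : part2_closeVal c = some v) :
    (o = '(' ∧ c = ')') ∨ (o = '[' ∧ c = ']') ∨ (o = '{' ∧ c = '}') ∨ (o = '<' ∧ c = '>') := by
  unfold part2_openVal at ho
  unfold part2_closeVal at hc
  split_ifs at ho <;> split_ifs at hc <;> simp_all <;> omega

-- a redex-free residue that the stack run completes is made of openers only
theorem part2_key_all_open (r : List Char) : ∀ (p : List Char),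
    (∀ ch ∈ p, (part2_openVal ch).isSome) →
    (∀ (o c : Char) (v : Nat), part2_openVal o = some v → part2_closeVal c = some v →
        ∀ u w, p ++ r ≠ u ++ o :: c :: w) →
    ∀ sf, part2_runL r ((p.map part2_ovD).reverse) = some (some sf) →
    ∀ ch ∈ r, (part2_openVal ch).isSome := by
  induction r with
  | nil => intro _ _ _ _ _ ch h; simp at h
  | cons c q ih =>
    intro p hp hno sf hrun ch hch
    match hoc : part2_openVal c with
    | some v =>
      have hstep : part2_runL (c :: q) ((p.map part2_ovD).reverse)
          = part2_runL q (((p ++ [c]).map part2_ovD).reverse) := by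
        rw [part2_runL_cons_open c q v _ hoc]
        simp [part2_ovD, hoc]
      have hp' : ∀ ch ∈ p ++ [c], (part2_openVal ch).isSome := by
        intro x hx
        rcases List.mem_append.mp hx with h | h
        · exact hp x h
        · simp at h; subst h; simp [hoc]
      have hno' : ∀ (o c' : Char) (v : Nat), part2_openVal o = some v →
          part2_closeVal c' = some v → ∀ u w, (p ++ [c]) ++ q ≠ u ++ o :: c' :: w := by
        intro o c' v' h1 h2 u w
        have := hno o c' v' h1 h2 u w
        simpa using this
      have := ih (p ++ [c]) hp' hno' sf (by rw [← hstep, hrun])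
      rcases List.mem_cons.mp hch with rfl | hch
      · simp [hoc]
      · exact this ch hch
    | none =>
      exfalso
      match hcc : part2_closeVal c with
      | none => rw [part2_runL_cons_bad c q _ hoc hcc] at hrun; simp at hrun
      | some w =>
        rcases p.eq_nil_or_concat with rfl | ⟨p', o, rfl⟩
        · simp only [List.map_nil, List.reverse_nil] at hrun
          rw [(part2_runL_cons_close c q w hoc hcc).2] at hrun; simp at hrun
        · simp only [List.concat_eq_append] at hp hno hrun
          have hoo := hp o (by simp)
          obtain ⟨vo, hvo⟩ := Option.isSome_iff_exists.mp hoo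
          have hst : ((p' ++ [o]).map part2_ovD).reverse
              = part2_ovD o :: (p'.map part2_ovD).reverse := by simp
          rw [hst, (part2_runL_cons_close c q w hoc hcc).1 _ _] at hrun
          by_cases hw : w = part2_ovD o
          · have hvo' : part2_openVal o = some w := by simp [part2_ovD, hvo] at hw ⊢; omega
            exact hno o c w hvo' hcc p' q (by simp)
          · rw [if_neg hw] at hrun
            simp at hrun

theorem part2_stepB_eq (s : List Char) :
    part2_stepB s = part2_repl '<' '>' (part2_repl '{' '}'
      (part2_repl '[' ']' (part2_repl '(' ')' s))) := by
  simp [part2_stepB, part2_replace_eq_repl]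

theorem part2_stepB_runL (s : List Char) (st : List Nat) :
    part2_runL (part2_stepB s) st = part2_runL s st := by
  rw [part2_stepB_eq,
    part2_repl_runL '<' '>' 3 (by decide) (by decide) _ st,
    part2_repl_runL '{' '}' 2 (by decide) (by decide) _ st,
    part2_repl_runL '[' ']' 1 (by decide) (by decide) _ st,
    part2_repl_runL '(' ')' 0 (by decide) (by decide) _ st]

theorem part2_stepB_len_eq (s : List Char) (h : (part2_stepB s).length = s.length) :
    part2_repl '(' ')' s = s ∧ part2_repl '[' ']' s = s ∧ part2_repl '{' '}' s = s ∧
    part2_repl '<' '>' s = s ∧ part2_stepB s = s := by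
  rw [part2_stepB_eq] at h
  have l1 := part2_repl_length '(' ')' s
  have l2 := part2_repl_length '[' ']' (part2_repl '(' ')' s)
  have l3 := part2_repl_length '{' '}' (part2_repl '[' ']' (part2_repl '(' ')' s))
  have l4 := part2_repl_length '<' '>'
    (part2_repl '{' '}' (part2_repl '[' ']' (part2_repl '(' ')' s)))
  have e1 : part2_repl '(' ')' s = s := part2_repl_len_eq _ _ _ (by omega)
  rw [e1] at l2 l3 l4 h
  have e2 : part2_repl '[' ']' s = s := part2_repl_len_eq _ _ _ (by omega)
  rw [e2] at l3 l4 h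
  have e3 : part2_repl '{' '}' s = s := part2_repl_len_eq _ _ _ (by omega)
  rw [e3] at l4 h
  have e4 : part2_repl '<' '>' s = s := part2_repl_len_eq _ _ _ (by omega)
  refine ⟨e1, e2, e3, e4, ?_⟩
  rw [part2_stepB_eq, e1, e2, e3, e4]

theorem part2_stepB_length (s : List Char) : (part2_stepB s).length ≤ s.length := by
  rw [part2_stepB_eq]
  calc _ ≤ (part2_repl '{' '}' (part2_repl '[' ']' (part2_repl '(' ')' s))).length :=
        part2_repl_length _ _ _
    _ ≤ (part2_repl '[' ']' (part2_repl '(' ')' s)).length := part2_repl_length _ _ _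
    _ ≤ (part2_repl '(' ')' s).length := part2_repl_length _ _ _
    _ ≤ s.length := part2_repl_length _ _ _

theorem part2_stepB_ne_lt (s : List Char) (h : part2_stepB s ≠ s) :
    (part2_stepB s).length < s.length := by
  rcases Nat.lt_or_ge (part2_stepB s).length s.length with hlt | hge
  · exact hlt
  · exact absurd (part2_stepB_len_eq s (Nat.le_antisymm (part2_stepB_length s) hge)).2.2.2.2 h

theorem part2_reduceB_fix : ∀ (f : Nat) (s : List Char), s.length < f →
    part2_stepB (part2_reduceB f s) = part2_reduceB f s := by
  intro f
  induction f with
  | zero => intro s h; omega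
  | succ f ih =>
    intro s h
    rw [part2_reduceB]
    by_cases he : part2_stepB s = s
    · simp [he]
    · simp only [if_neg he]
      exact ih (part2_stepB s) (by have := part2_stepB_ne_lt s he; omega)

theorem part2_reduceB_runL : ∀ (f : Nat) (s : List Char) (st : List Nat),
    part2_runL (part2_reduceB f s) st = part2_runL s st := by
  intro f
  induction f with
  | zero => intro s st; rfl
  | succ f ih =>
    intro s st
    rw [part2_reduceB]
    by_cases he : part2_stepB s = s
    · simp [he]
    · simp only [if_neg he]
      rw [ih (part2_stepB s) st, part2_stepB_runL]

theorem part2_fix_no_occ (r : List Char) (h : part2_stepB r = r) :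
    ∀ (o c : Char) (v : Nat), part2_openVal o = some v → part2_closeVal c = some v →
      ∀ u w, r ≠ u ++ o :: c :: w := by
  have h4 := part2_stepB_len_eq r (by rw [h])
  intro o c v ho hc u w
  rcases part2_pair_class o c v ho hc with ⟨rfl, rfl⟩ | ⟨rfl, rfl⟩ | ⟨rfl, rfl⟩ | ⟨rfl, rfl⟩
  · exact part2_repl_fix_no_occ _ _ _ h4.1 u w
  · exact part2_repl_fix_no_occ _ _ _ h4.2.1 u w
  · exact part2_repl_fix_no_occ _ _ _ h4.2.2.1 u w
  · exact part2_repl_fix_no_occ _ _ _ h4.2.2.2.1 u w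

theorem part2_openVal_some (c : Char) (v : Nat) (h : part2_openVal c = some v) :
    PySem.Chars.isIn [c] part2_openers = true ∧
    PySem.Chars.find part2_openers [c] = (v : Int) ∧ v < 4 := by
  unfold part2_openVal at h
  split_ifs at h with h1 h2 h3 h4 <;> injection h with h <;> subst h <;> subst_vars <;> decide

theorem part2_openVal_none_isIn (c : Char) (h : part2_openVal c = none) :
    PySem.Chars.isIn [c] part2_openers = false := by
  unfold part2_openVal at h
  split_ifs at h with h1 h2 h3 h4
  rw [PySem.Chars.isIn_eq_false_iff]
  intro hin
  have hc : c ∈ part2_openers := hin.subset (List.mem_singleton_self c)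
  simp [part2_openers] at hc
  tauto

theorem part2_closeVal_some (c : Char) (w : Nat) (h : part2_closeVal c = some w) :
    part2_openVal c = none ∧ PySem.Chars.find part2_closers [c] = (w : Int) ∧ w < 4 ∧
    PySem.Chars.isIn [c] part2_closers = true := by
  unfold part2_closeVal at h
  split_ifs at h with h1 h2 h3 h4 <;> injection h with h <;> subst h <;> subst_vars <;> decide

theorem part2_closeVal_none (c : Char) (ho : part2_openVal c = none)
    (hc : part2_closeVal c = none) : PySem.Chars.find part2_closers [c] = -1 := by
  unfold part2_openVal at ho
  unfold part2_closeVal at hc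
  split_ifs at ho with h1 h2 h3 h4
  split_ifs at hc with h5 h6 h7 h8
  rw [PySem.Chars.find_eq_neg_one_iff]
  intro hin
  have hm : c ∈ part2_closers := hin.subset (List.mem_singleton_self c)
  simp [part2_closers] at hm
  tauto

def part2_cchar (o : Int) : Char :=
  if o = 0 then ')' else if o = 1 then ']' else if o = 2 then '}' else '>'

theorem part2_missing_acc (op : List Int) : ∀ (acc : List Char), (∀ o ∈ op, 0 ≤ o ∧ o < 4) →
    op.foldlM (fun acc o => (PySem.List.pyGet? part2_closers o).map (fun ch => acc ++ [ch])) acc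
      = some (acc ++ op.map part2_cchar) := by
  induction op with
  | nil => simp
  | cons o os ih =>
    intro acc hb
    obtain ⟨hb0, hb1⟩ := hb o (by simp)
    have h1 : PySem.List.pyGet? part2_closers o = some (part2_cchar o) := by
      interval_cases o <;> decide
    simp [h1, ih (acc ++ [part2_cchar o]) (fun x hx => hb x (by simp [hx]))]

def part2_scoreSt (sf : List Nat) : Int :=
  sf.foldl (fun (a : Int) (v : Nat) => a * 5 + (v : Int) + 1) 0

theorem part2_missing_score (op : List Int) (hb : ∀ o ∈ op, 0 ≤ o ∧ o < 4) :
    part2_missing op = some (op.map part2_cchar) ∧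
    part2_scoreLoop ((PySem.List.slice? (op.map part2_cchar) none none (-1)).getD [])
      = part2_scoreSt ((op.map Int.toNat).reverse) := by
  refine ⟨by simpa [part2_missing] using part2_missing_acc op [] hb, ?_⟩
  have hs : (PySem.List.slice? (op.map part2_cchar) none none (-1)).getD []
      = (op.map part2_cchar).reverse := by simp [pysem]
  rw [hs, part2_scoreLoop, part2_scoreSt]
  rw [show ((op.map Int.toNat).reverse : List Nat) = op.reverse.map Int.toNat from by simp]
  rw [show ((op.map part2_cchar).reverse : List Char) = op.reverse.map part2_cchar from by simp]
  rw [List.foldl_map, List.foldl_map]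
  apply PySem.List.foldl_congr_mem
  intro a o ho
  obtain ⟨hb0, hb1⟩ := hb o (List.mem_reverse.mp ho)
  have h1 : (if part2_cchar o = ')' then (1 : Int) else if part2_cchar o = ']' then 2
      else if part2_cchar o = '}' then 3 else 4) = (o.toNat : Int) + 1 := by
    interval_cases o <;> decide
  rw [h1]; ring

-- A's matching loop against the canonical stack run
theorem part2_line_rel (cs : List Char) : ∀ (stA : List Int), (∀ o ∈ stA, 0 ≤ o ∧ o < 4) →
    (part2_runL cs ((stA.map Int.toNat).reverse) = none → part2_matchA cs stA = none)
  ∧ (part2_runL cs ((stA.map Int.toNat).reverse) = some none →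
      ∃ r, part2_matchA cs stA = some (true, r))
  ∧ (∀ sf, part2_runL cs ((stA.map Int.toNat).reverse) = some (some sf) →
      ∃ op, part2_matchA cs stA = some (false, op) ∧ (∀ o ∈ op, 0 ≤ o ∧ o < 4) ∧
        sf = (op.map Int.toNat).reverse) := by
  induction cs with
  | nil =>
    intro stA hb
    refine ⟨by intro h; simp [part2_runL] at h, by intro h; simp [part2_runL] at h, ?_⟩
    intro sf h
    simp only [part2_runL, Option.some.injEq] at h
    exact ⟨stA, rfl, hb, h.symm⟩
  | cons c cs ih =>
    intro stA hb
    match hov : part2_openVal c with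
    | some v =>
      obtain ⟨hin, hfind, hlt⟩ := part2_openVal_some c v hov
      have hstk : (((stA ++ [(v : Int)]).map Int.toNat).reverse)
          = v :: (stA.map Int.toNat).reverse := by simp
      have hb' : ∀ o ∈ stA ++ [(v : Int)], 0 ≤ o ∧ o < 4 := by
        intro o ho
        rcases List.mem_append.mp ho with h | h
        · exact hb o h
        · simp at h; subst h; constructor <;> omega
      have hA : part2_matchA (c :: cs) stA = part2_matchA cs (stA ++ [(v : Int)]) := by
        simp [part2_matchA, hin, hfind]
      have hS : part2_runL (c :: cs) ((stA.map Int.toNat).reverse)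
          = part2_runL cs (((stA ++ [(v : Int)]).map Int.toNat).reverse) := by
        rw [hstk]
        exact part2_runL_cons_open c cs v _ hov
      rw [hA, hS]
      exact ih (stA ++ [(v : Int)]) hb'
    | none =>
      have hni := part2_openVal_none_isIn c hov
      match hcv : part2_closeVal c with
      | some w =>
        obtain ⟨-, hfind, hwlt, -⟩ := part2_closeVal_some c w hcv
        rcases stA.eq_nil_or_concat with rfl | ⟨rest, temp, rfl⟩
        · have hrl : part2_runL (c :: cs) (([] : List Int).map Int.toNat).reverse = none := by
            simpa using (part2_runL_cons_close c cs w hov hcv).2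
          refine ⟨fun _ => ?_, fun h => ?_, fun sf h => ?_⟩
          · simp [part2_matchA, hni, PySem.List.pop?]
          · rw [hrl] at h; simp at h
          · rw [hrl] at h; simp at h
        · simp only [List.concat_eq_append] at hb ⊢
          have htemp := hb temp (by simp)
          have hpopA : PySem.List.pop? (rest ++ [temp]) = some (temp, rest) :=
            PySem.List.pop?_last rest temp
          have hb' : ∀ o ∈ rest, 0 ≤ o ∧ o < 4 := fun o ho => hb o (by simp [ho])
          have hstk : (((rest ++ [temp]).map Int.toNat).reverse)
              = temp.toNat :: (rest.map Int.toNat).reverse := by simp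
          have hrl : part2_runL (c :: cs) (((rest ++ [temp]).map Int.toNat).reverse)
              = if w = temp.toNat then part2_runL cs ((rest.map Int.toNat).reverse)
                else some none := by
            rw [hstk]
            exact (part2_runL_cons_close c cs w hov hcv).1 _ _
          by_cases hw : w = temp.toNat
          · have hwi : (w : Int) = temp := by omega
            have hA : part2_matchA (c :: cs) (rest ++ [temp]) = part2_matchA cs rest := by
              rw [part2_matchA]
              simp only [hni, Bool.false_eq_true, if_false, hpopA, hfind, hwi]
              simp [show ¬(temp = -1) from by omega]
            rw [hA, hrl, if_pos hw]
            exact ih rest hb'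
          · have hwi : (w : Int) ≠ temp := by omega
            have hA : part2_matchA (c :: cs) (rest ++ [temp]) = some (true, rest) := by
              rw [part2_matchA]
              simp only [hni, Bool.false_eq_true, if_false, hpopA, hfind]
              simp [hwi, show ¬((w : Int) = -1) from by omega]
            rw [hA, hrl, if_neg hw]
            refine ⟨fun h => by simp at h, fun _ => ⟨rest, rfl⟩, fun sf h => by simp at h⟩
      | none =>
        have hfneg := part2_closeVal_none c hov hcv
        have hrl : part2_runL (c :: cs) ((stA.map Int.toNat).reverse) = none :=
          part2_runL_cons_bad c cs _ hov hcv
        refine ⟨fun _ => ?_, fun h => ?_, fun sf h => ?_⟩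
        · rw [part2_matchA]
          simp only [hni, Bool.false_eq_true, if_false]
          rcases stA.eq_nil_or_concat with rfl | ⟨rest, temp, rfl⟩
          · simp [PySem.List.pop?]
          · rw [List.concat_eq_append, PySem.List.pop?_last]
            simp [hfneg]
        · rw [hrl] at h; simp at h
        · rw [hrl] at h; simp at h
theorem part2_closeVal_none_isIn (c : Char) (h : part2_closeVal c = none) :
    PySem.Chars.isIn [c] part2_closers = false := by
  unfold part2_closeVal at h
  split_ifs at h with h1 h2 h3 h4
  rw [PySem.Chars.isIn_eq_false_iff]
  intro hin
  have hc : c ∈ part2_closers := hin.subset (List.mem_singleton_self c)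
  simp [part2_closers] at hc
  tauto

-- a corrupt run means a closing bracket is present
theorem part2_corrupt_has_closer (r : List Char) : ∀ (st : List Nat),
    part2_runL r st = some none → ∃ ch ∈ r, (part2_closeVal ch).isSome := by
  induction r with
  | nil => intro st h; simp [part2_runL] at h
  | cons c q ih =>
    intro st h
    match hoc : part2_openVal c with
    | some v =>
      rw [part2_runL_cons_open c q v st hoc] at h
      obtain ⟨ch, hm, hs⟩ := ih (v :: st) h
      exact ⟨ch, by simp [hm], hs⟩
    | none =>
      match hcc : part2_closeVal c with
      | some w => exact ⟨c, by simp, by simp [hcc]⟩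
      | none => rw [part2_runL_cons_bad c q st hoc hcc] at h; simp at h

-- the scoring fold succeeds on an openers-only residue
theorem part2_scoreFold_open (xs : List Char) : ∀ (init : Int),
    (∀ ch ∈ xs, (part2_openVal ch).isSome) →
    xs.foldlM (fun score ch =>
        let f := PySem.Chars.find part2_openers [ch]
        if f = -1 then none else some (score * 5 + f + 1)) init
      = some (xs.foldl (fun (a : Int) ch => a * 5 + ((part2_ovD ch : Nat) : Int) + 1) init) := by
  induction xs with
  | nil => intro init _; rfl
  | cons c q ih =>
    intro init hall
    obtain ⟨v, hv⟩ := Option.isSome_iff_exists.mp (hall c (by simp))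
    have hfind := (part2_openVal_some c v hv).2.1
    have hne : ¬ (PySem.Chars.find part2_openers [c] = -1) := by rw [hfind]; omega
    have hd : part2_ovD c = v := by simp [part2_ovD, hv]
    rw [List.foldlM_cons]
    simp only [if_neg hne]
    rw [show ∀ (a : Int) (f : Int → Option Int), some a >>= f = f a from fun _ _ => rfl]
    rw [ih (init * 5 + PySem.Chars.find part2_openers [c] + 1)
      (fun x hx => hall x (by simp [hx]))]
    rw [List.foldl_cons, hfind, hd]

-- B's per-line value against the canonical stack run
theorem part2_lineB_eq (l : List Char) :
    (part2_runL l [] = some none → part2_lineB l = some none)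
  ∧ (∀ sf, part2_runL l [] = some (some sf) →
      part2_lineB l = some (some (part2_scoreSt sf))) := by
  have hrun : ∀ st, part2_runL (part2_reduceB (l.length + 1) l) st = part2_runL l st :=
    fun st => part2_reduceB_runL (l.length + 1) l st
  have hfix : part2_stepB (part2_reduceB (l.length + 1) l)
      = part2_reduceB (l.length + 1) l := part2_reduceB_fix (l.length + 1) l (by omega)
  set r := part2_reduceB (l.length + 1) l with hr
  have hno := part2_fix_no_occ r hfix
  constructor
  · intro hcor
    rw [part2_lineB, ← hr]
    have hcond : r.any (fun ch => PySem.Chars.isIn [ch] part2_closers) = true := by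
      obtain ⟨ch, hm, hs⟩ := part2_corrupt_has_closer r [] ((hrun []).trans hcor)
      obtain ⟨w, hw⟩ := Option.isSome_iff_exists.mp hs
      rw [List.any_eq_true]
      exact ⟨ch, hm, (part2_closeVal_some ch w hw).2.2.2⟩
    simp [hcond]
  · intro sf hsf
    rw [part2_lineB, ← hr]
    have hop : ∀ ch ∈ r, (part2_openVal ch).isSome := by
      apply part2_key_all_open r [] (by simp) (fun o c v ho hc u w => by
        simpa using hno o c v ho hc u w) sf
      simpa using (hrun []).trans hsf
    have hcond : r.any (fun ch => PySem.Chars.isIn [ch] part2_closers) = false := by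
      rw [List.any_eq_false]
      intro ch hch
      obtain ⟨v, hv⟩ := Option.isSome_iff_exists.mp (hop ch hch)
      rw [part2_closeVal_none_isIn ch ((part2_open_close_distinct ch).1 v hv)]
      simp
    have hsf' : sf = (r.map part2_ovD).reverse := by
      have := part2_runL_all_open r hop []
      rw [hrun [], hsf] at this
      rw [List.append_nil] at this
      simp only [Option.some.injEq] at this
      exact this
    rw [hcond]
    simp only [Bool.false_eq_true, if_false]
    rw [part2_scoreFold_open r.reverse 0 (fun ch hch => hop ch (List.mem_reverse.mp hch))]
    have hscore : r.reverse.foldl (fun (a : Int) ch => a * 5 + ((part2_ovD ch : Nat) : Int) + 1) 0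
        = part2_scoreSt sf := by
      rw [hsf', part2_scoreSt]
      rw [show ((r.map part2_ovD).reverse) = r.reverse.map part2_ovD from by simp,
        List.foldl_map]
    rw [hscore]

theorem part2_scores_eq (ls : List String) : ∀ (acc : List Int),
    (∀ l ∈ ls, (part2_runL l.toList []).isSome) →
    part2_scoresA ls acc = ls.foldlM (fun scores line =>
      (part2_lineB line.toList).map (fun r =>
        match r with
        | some s => scores ++ [s]
        | none => scores)) acc := by
  induction ls with
  | nil => intro acc _; rfl
  | cons l ls ih =>
    intro acc hall
    have hl : (part2_runL l.toList []).isSome := hall l (by simp)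
    have hrel := part2_line_rel l.toList [] (by simp)
    simp only [List.map_nil, List.reverse_nil] at hrel
    have hlb := part2_lineB_eq l.toList
    match hst : part2_runL l.toList [] with
    | none => rw [hst] at hl; simp at hl
    | some none =>
      obtain ⟨r, hA⟩ := hrel.2.1 hst
      rw [part2_scoresA, hA, List.foldlM_cons, hlb.1 hst]
      simp only [Option.map_some]
      exact ih acc (fun x hx => hall x (by simp [hx]))
    | some (some sf) =>
      obtain ⟨op, hA, hbop, hsf⟩ := hrel.2.2 sf hst
      obtain ⟨hm, hsc⟩ := part2_missing_score op hbop
      rw [part2_scoresA, hA, List.foldlM_cons, hlb.2 sf hst]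
      simp only [Option.map_some, Bool.false_eq_true, if_false, hm, hsc, hsf]
      exact ih _ (fun x hx => hall x (by simp [hx]))

-- ===== VERDICT (by name: the statement is the Claim_ definition above) =====
theorem part2_spec : Claim_equal_part2 := by
  intro lines _ hpre
  unfold Spec_part2 part2 part2_alt
  have hall : ∀ l ∈ lines, (part2_runL l.toList []).isSome := by
    have := hpre.1
    simpa [List.all_eq_true] using this
  rw [part2_scores_eq lines [] hall]
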